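-- pv_equiv track=rewrite | github.com/danieljhkim/DataStructures-Algorithms | python/leetcode/favorites/bit/q3513.py | uniqueXorTriplets
-- ===== SOURCE A (Python) =====
-- from typing import List
--
-- def uniqueXorTriplets(nums: List[int]) -> int:
--     n = len(nums)
--     if n <= 2:
--         return n
--     i = 1
--     while i <= n:
--         i = i * 2
--     return i
-- ===== SOURCE B (Python) =====
-- from typing import List
--
-- def uniqueXorTriplets(nums: List[int]) -> int:
--     n = len(nums)
--     if n <= 2:
--         return n
--     return 1 << n.bit_length()
-- ===== Notes on version B (the rewrite author's own statement) =====
-- stated objective: idiomatic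
-- what changed: Replaces the doubling while-loop with the closed-form bit computation 1 << n.bit_length(), which yields the smallest power of two strictly greater than n without iteration.
import Mathlib
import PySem

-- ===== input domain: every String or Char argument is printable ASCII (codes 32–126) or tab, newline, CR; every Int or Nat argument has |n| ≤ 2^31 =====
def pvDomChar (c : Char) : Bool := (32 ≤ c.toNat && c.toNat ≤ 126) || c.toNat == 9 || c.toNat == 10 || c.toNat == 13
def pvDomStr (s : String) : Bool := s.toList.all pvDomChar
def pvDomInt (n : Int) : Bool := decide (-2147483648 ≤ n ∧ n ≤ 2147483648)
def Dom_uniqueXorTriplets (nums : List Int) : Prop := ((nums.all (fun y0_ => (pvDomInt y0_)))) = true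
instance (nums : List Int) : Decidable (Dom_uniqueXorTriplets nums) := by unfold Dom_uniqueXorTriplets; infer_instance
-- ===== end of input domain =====

-- B replaces A's doubling while-loop by the closed-form 1 << n.bit_length() (idiomatic, no iteration).

-- ===== PORT A =====
-- the 'while i <= n: i = i * 2' loop; fuel (len+1) only makes the recursion total,
-- it is never hit since doubling from 1 exceeds n within n steps
def uxtLoop (fuel : Nat) (n i : Int) : Int :=
  match fuel with
  | 0 => i
  | f + 1 => if i ≤ n then uxtLoop f n (i * 2) else i

def uniqueXorTriplets (nums : List Int) : Int :=
  let n : Int := nums.length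
  if n ≤ 2 then n else uxtLoop (nums.length + 1) n 1

-- ===== PORT B =====
-- Python's int.bit_length for a nonnegative integer (fuel = m makes the halving recursion structural)
def bitLengthAux : Nat → Nat → Nat
  | 0, _ => 0
  | fuel + 1, m => if m = 0 then 0 else bitLengthAux fuel (m / 2) + 1

def bitLength (m : Nat) : Nat := bitLengthAux m m

def uniqueXorTriplets_alt (nums : List Int) : Int :=
  let n : Int := nums.length
  if n ≤ 2 then n else ((1 <<< bitLength nums.length : Nat) : Int)

-- ===== PRECONDITION & SPEC =====
def Spec_uniqueXorTriplets (nums : List Int) (out : Int) : Prop := out = uniqueXorTriplets_alt nums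
instance (nums : List Int) (out : Int) : Decidable (Spec_uniqueXorTriplets nums out) := by unfold Spec_uniqueXorTriplets; infer_instance

-- ===== CLAIM (what is proved, stated in full; the proofs are below) =====
def Claim_equal_uniqueXorTriplets : Prop := ∀ (nums : List Int), Dom_uniqueXorTriplets nums → Spec_uniqueXorTriplets nums (uniqueXorTriplets nums)

-- ===== LEMMAS AND PROOFS =====

theorem bitLengthAux_gt (fuel : Nat) : ∀ m, m ≤ fuel → m < 2 ^ bitLengthAux fuel m := by
  induction fuel with
  | zero => intro m h; interval_cases m; simp [bitLengthAux]
  | succ f ih =>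
    intro m h
    rw [bitLengthAux]
    split
    · omega
    · have := ih (m / 2) (by omega)
      rw [pow_succ]
      omega

theorem bitLength_gt (m : Nat) : m < 2 ^ bitLength m := bitLengthAux_gt m m le_rfl

theorem bitLengthAux_pow_le (fuel : Nat) : ∀ k m, m ≤ fuel → k < bitLengthAux fuel m → 2 ^ k ≤ m := by
  induction fuel with
  | zero => intro k m h hk; simp [bitLengthAux] at hk
  | succ f ih =>
    intro k m h hk
    rw [bitLengthAux] at hk
    split at hk
    · omega
    · cases k with
      | zero => simpa using Nat.pos_of_ne_zero (by assumption)
      | succ k =>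
        have := ih k (m / 2) (by omega) (by omega)
        rw [pow_succ]
        omega

theorem pow_le_of_lt_bitLength (k m : Nat) (h : k < bitLength m) : 2 ^ k ≤ m :=
  bitLengthAux_pow_le m k m le_rfl h

theorem bitLength_le (m k : Nat) (h : m < 2 ^ k) : bitLength m ≤ k := by
  by_contra hc
  exact absurd (pow_le_of_lt_bitLength k m (by omega)) (by omega)

theorem uxtLoop_stop (fuel : Nat) (n i : Int) (h : ¬ i ≤ n) : uxtLoop fuel n i = i := by
  cases fuel <;> simp [uxtLoop, h]

theorem uxtLoop_eq (fuel : Nat) : ∀ (m j : Nat), 2 ^ j ≤ m → m < 2 ^ (j + fuel) →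
    uxtLoop fuel (m : Int) ((2 : Int) ^ j) = (2 : Int) ^ bitLength m := by
  induction fuel with
  | zero => intro m j h1 h2; rw [Nat.add_zero] at h2; omega
  | succ f ih =>
    intro m j h1 h2
    have hle : (2 : Int) ^ j ≤ (m : Int) := by exact_mod_cast h1
    have hstep : (2 : Int) ^ j * 2 = (2 : Int) ^ (j + 1) := by rw [pow_succ]
    rw [uxtLoop, if_pos hle, hstep]
    by_cases h2' : 2 ^ (j + 1) ≤ m
    · exact ih m (j + 1) h2' (by rw [show j + 1 + f = j + (f + 1) from by omega]; exact h2)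
    · have hn : ¬ (2 : Int) ^ (j + 1) ≤ (m : Int) := by exact_mod_cast h2'
      rw [uxtLoop_stop f _ _ hn]
      have hlt : j < bitLength m := by
        by_contra hc
        have hpow : (2:Nat) ^ bitLength m ≤ 2 ^ j := Nat.pow_le_pow_right (by norm_num) (by omega)
        have hg := bitLength_gt m
        omega
      have hle' : bitLength m ≤ j + 1 := bitLength_le m (j + 1) (by omega)
      have heq : bitLength m = j + 1 := by omega
      rw [heq]

theorem uniqueXorTriplets_spec : Claim_equal_uniqueXorTriplets := by
  unfold Claim_equal_uniqueXorTriplets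
  intro nums _
  unfold Spec_uniqueXorTriplets uniqueXorTriplets uniqueXorTriplets_alt
  simp only []
  by_cases h : (nums.length : Int) ≤ 2
  · simp [h]
  · rw [if_neg h, if_neg h]
    have h3 : 3 ≤ nums.length := by omega
    have h1 : 2 ^ 0 ≤ nums.length := by simpa using by omega
    have h2 : nums.length < 2 ^ (0 + (nums.length + 1)) := by
      simp only [Nat.zero_add]
      calc nums.length < 2 ^ nums.length := Nat.lt_two_pow_self
        _ ≤ 2 ^ (nums.length + 1) := Nat.pow_le_pow_right (by norm_num) (by omega)
    have := uxtLoop_eq (nums.length + 1) nums.length 0 h1 h2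
    simp only [pow_zero] at this
    rw [this, Nat.one_shiftLeft]
    push_cast
    ring
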